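-- pv_equiv track=rewrite | github.com/pypi-data/pypi-mirror-399 | packages/skill-security-scan/skill_security_scan-1.0.0.tar.gz/skill_security_scan-1.0.0/src/reporters/console.py | _group_by_severity
-- ===== SOURCE A (Python) =====
-- from typing import Dict, Any
--
-- def _group_by_severity(findings: list) -> Dict[str, list]:
--     """按严重级别分组"""
--     grouped = {}
--     for finding in findings:
--         severity = finding.get('severity', 'INFO')
--         if severity not in grouped:
--             grouped[severity] = []
--         grouped[severity].append(finding)
--     return grouped
-- ===== SOURCE B (Python) =====
-- def _group_by_severity(findings: list):
--     """按严重级别分组"""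
--     keys = dict.fromkeys(f.get('severity', 'INFO') for f in findings)
--     return {sev: [f for f in findings if f.get('severity', 'INFO') == sev]
--             for sev in keys}
-- ===== Notes on version B (the rewrite author's own statement) =====
-- stated objective: alternative
-- what changed: Replaces the single accumulating dict pass with a two-phase build: collect the distinct severity labels in first-occurrence order via dict.fromkeys, then a dict comprehension that filters the full findings list once per label.
import Mathlib
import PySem

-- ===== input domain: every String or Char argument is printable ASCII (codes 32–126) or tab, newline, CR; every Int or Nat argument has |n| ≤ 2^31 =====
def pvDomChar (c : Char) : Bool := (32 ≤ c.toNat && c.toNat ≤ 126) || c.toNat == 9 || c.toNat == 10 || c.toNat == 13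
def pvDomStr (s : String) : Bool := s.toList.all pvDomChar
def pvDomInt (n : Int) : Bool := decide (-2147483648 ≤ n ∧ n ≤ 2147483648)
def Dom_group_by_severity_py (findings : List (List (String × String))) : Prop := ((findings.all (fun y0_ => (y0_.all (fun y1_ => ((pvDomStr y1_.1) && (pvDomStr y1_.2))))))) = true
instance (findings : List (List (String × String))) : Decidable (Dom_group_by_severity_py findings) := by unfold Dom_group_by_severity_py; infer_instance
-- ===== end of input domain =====

-- B builds the result in two phases (distinct labels, then one filter per label) instead of A's single accumulating dict pass; objective: alternative.

-- ===== PORT A =====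
def group_by_severity_py (findings : List (List (String × String))) : List (String × List (List (String × String))) :=
  (findings.foldl (fun grouped finding =>
      let severity := (PySem.Dict.mk finding).getD "severity" "INFO"
      let grouped := if grouped.contains severity then grouped
                     else grouped.insert severity ([] : List (List (String × String)))
      grouped.modify severity [] (· ++ [finding]))
    PySem.Dict.empty).items

-- ===== PORT B =====
def group_by_severity_py_alt (findings : List (List (String × String))) : List (String × List (List (String × String))) :=
  let keys := PySem.List.dedup (findings.map (fun f => (PySem.Dict.mk f).getD "severity" "INFO"))
  keys.map (fun sev =>
    (sev, findings.filter (fun f => (PySem.Dict.mk f).getD "severity" "INFO" == sev)))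

-- ===== PRECONDITION & SPEC =====
def Spec_group_by_severity_py (findings : List (List (String × String))) (out : List (String × List (List (String × String)))) : Prop := out = group_by_severity_py_alt findings
instance (findings : List (List (String × String))) (out : List (String × List (List (String × String)))) : Decidable (Spec_group_by_severity_py findings out) := by unfold Spec_group_by_severity_py; infer_instance

-- ===== CLAIM (what is proved, stated in full; the proofs are below) =====
def Claim_equal_group_by_severity_py : Prop := ∀ (findings : List (List (String × String))), Dom_group_by_severity_py findings → Spec_group_by_severity_py findings (group_by_severity_py findings)

-- ===== LEMMAS AND PROOFS =====

-- The per-element step of A: "insert [] if absent, then append" is exactly one modify.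
theorem pv_step_eq (g : PySem.Dict String (List (List (String × String))))
    (s : String) (fn : List (String × String)) :
    (if g.contains s then g else g.insert s ([] : List (List (String × String)))).modify s []
        (· ++ [fn])
      = g.modify s [] (· ++ [fn]) := by
  by_cases h : g.contains s = true
  · simp [h]
  · simp only [h, Bool.false_eq_true, reduceIte]
    show (g.insert s []).insert s _ = g.insert s _
    rw [PySem.Dict.getD_insert_self, PySem.Dict.insert_insert_self,
      PySem.Dict.getD_of_not_contains g [] (by simpa using h)]

-- A's fold is the plain modify-loop keyed by the severity projection.
theorem pv_fold_eq (findings : List (List (String × String))) :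
    (findings.foldl (fun grouped finding =>
        let severity := (PySem.Dict.mk finding).getD "severity" "INFO"
        let grouped := if grouped.contains severity then grouped
                       else grouped.insert severity ([] : List (List (String × String)))
        grouped.modify severity [] (· ++ [finding]))
      PySem.Dict.empty)
    = findings.foldl (fun grouped finding =>
        grouped.modify ((PySem.Dict.mk finding).getD "severity" "INFO") [] (· ++ [finding]))
      PySem.Dict.empty := by
  apply PySem.List.foldl_congr_mem
  intro acc x _
  exact pv_step_eq acc _ x

theorem pv_getD_fold (findings : List (List (String × String))) (c : String) :
    (findings.foldl (fun grouped finding =>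
        grouped.modify ((PySem.Dict.mk finding).getD "severity" "INFO") [] (· ++ [finding]))
      PySem.Dict.empty).getD c []
    = findings.filter (fun f => (PySem.Dict.mk f).getD "severity" "INFO" == c) := by
  have h := PySem.Dict.getD_foldl_modify_append
    (l := findings.map (fun f => ((PySem.Dict.mk f).getD "severity" "INFO", f)))
    (d := (PySem.Dict.empty : PySem.Dict String (List (List (String × String))))) (c := c)
  rw [List.foldl_map] at h
  rw [List.filter_map] at h
  simpa [Function.comp_def] using h

-- ===== VERDICT =====
theorem group_by_severity_py_spec : Claim_equal_group_by_severity_py := by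
  intro findings _
  show group_by_severity_py findings = group_by_severity_py_alt findings
  unfold group_by_severity_py group_by_severity_py_alt
  rw [pv_fold_eq]
  set d := findings.foldl (fun grouped finding =>
      grouped.modify ((PySem.Dict.mk finding).getD "severity" "INFO") [] (· ++ [finding]))
    PySem.Dict.empty with hd
  have hkeys : d.keys = PySem.List.dedup (findings.map (fun f => (PySem.Dict.mk f).getD "severity" "INFO")) := by
    rw [hd, PySem.Dict.keys_foldl_modify_key]
    simp [PySem.Set.update, PySem.List.dedup_eq_ofList, PySem.Set.ofList_eq_foldl]
  have hnd : d.keys.Nodup := by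
    rw [hd]
    exact PySem.Dict.nodup_keys_foldl_modify_key _ _ _ _ _ PySem.Dict.nodup_keys_empty
  rw [PySem.Dict.items_eq_map_keys d hnd [], hkeys]
  apply List.map_congr_left
  intro s _
  simp only [Prod.mk.injEq, true_and]
  exact pv_getD_fold findings s
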